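-- pv_equiv track=rewrite | github.com/Chani0125/Baekjoon | 카드_게임.py | card
-- ===== SOURCE A (Python) =====
-- def card(start, end, dp, t, n) -> int:
--     n_card = end - start
--     if n_card < 0:
--         return 0
--     if n_card == 0:
--         return t[start]
--
--     if ((n - n_card) % 2 == 0):
--         dp[start][end] = max(card(start+1, end, dp, t, n) + t[start], card(start, end-1, dp, t, n) + t[end])
--         return dp[start][end]
--     else:
--         dp[start][end] = min(card(start+1, end, dp, t, n) + t[start], card(start, end-1, dp, t, n) + t[end])
--         return dp[start][end]
-- ===== SOURCE B (Python) =====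
-- def card(start, end, dp, t, n) -> int:
--     # Bottom-up interval DP over interval lengths (O(len^2)) instead of A's
--     # exponential recursion; writes the same dp[s][e] entries A would.
--     if end < start:
--         return 0
--     cur = [t[start + k] for k in range(end - start + 1)]
--     for length in range(1, end - start + 1):
--         take_max = (n - length) % 2 == 0
--         nxt = []
--         for k in range(end - start + 1 - length):
--             s = start + k
--             e = s + length
--             a = cur[k + 1] + t[s]
--             b = cur[k] + t[e]
--             v = max(a, b) if take_max else min(a, b)
--             dp[s][e] = v
--             nxt.append(v)
--         cur = nxt
--     return cur[0]
-- ===== Notes on version B (the rewrite author's own statement) =====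
-- stated objective: faster
-- what changed: Replaces A's exponential top-down recursion (which never reads its dp memo) with a bottom-up interval DP that builds one row of interval values per length, O(len^2) instead of O(2^len).
import Mathlib
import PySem

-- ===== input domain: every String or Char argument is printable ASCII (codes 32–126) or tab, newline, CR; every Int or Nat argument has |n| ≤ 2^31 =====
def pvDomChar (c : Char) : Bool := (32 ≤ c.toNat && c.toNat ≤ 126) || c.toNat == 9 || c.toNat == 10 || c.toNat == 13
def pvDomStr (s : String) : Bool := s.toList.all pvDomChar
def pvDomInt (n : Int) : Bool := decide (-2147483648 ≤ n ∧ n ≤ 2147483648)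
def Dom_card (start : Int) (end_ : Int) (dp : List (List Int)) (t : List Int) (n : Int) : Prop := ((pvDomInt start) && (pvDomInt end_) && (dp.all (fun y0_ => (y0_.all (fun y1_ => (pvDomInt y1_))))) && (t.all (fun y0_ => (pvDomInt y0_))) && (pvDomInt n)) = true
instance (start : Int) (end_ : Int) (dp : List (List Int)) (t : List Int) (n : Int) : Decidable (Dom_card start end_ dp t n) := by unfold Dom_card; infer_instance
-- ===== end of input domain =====

-- ===== PORT A =====
-- B changes the exponential recursion into a bottom-up interval DP (asymptotically
-- faster). Both Pythons assign dp[s][e]; equivalence proved here is about the RETURN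
-- value only (on aliasing negative indices the write ORDER into dp differs).
-- t[i] with Python index semantics; Pre_card guarantees the index is in range.
def tGet (t : List Int) (i : Int) : Int := (PySem.List.pyGet? t i).getD 0

def card (start : Int) (end_ : Int) (dp : List (List Int)) (t : List Int) (n : Int) : Int :=
  let n_card := end_ - start
  if _h1 : n_card < 0 then 0
  else if _h2 : n_card = 0 then tGet t start
  else if PySem.Int.mod (n - n_card) 2 = 0 then
    max (card (start+1) end_ dp t n + tGet t start) (card start (end_-1) dp t n + tGet t end_)
  else
    min (card (start+1) end_ dp t n + tGet t start) (card start (end_-1) dp t n + tGet t end_)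
termination_by (end_ - start).toNat
decreasing_by all_goals omega

-- ===== PORT B =====
-- initial row: length-1 intervals, cur[k] = t[start+k]
def bInit (t : List Int) (start : Int) (m : Nat) : List Int :=
  (List.range (m+1)).map (fun (k : Nat) => tGet t (start + (k : Int)))

-- one pass of the inner loop of Source B: from intervals of length L'+1 to length L'+2
def bRow (t : List Int) (start : Int) (n : Int) (m : Nat) (cur : List Int) (L' : Nat) : List Int :=
  let length : Int := (L' : Int) + 1
  (List.range (m - L')).map (fun k =>
    let a := cur.getD (k+1) 0 + tGet t (start + (k : Int))
    let b := cur.getD k 0 + tGet t (start + (k : Int) + length)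
    if PySem.Int.mod (n - length) 2 = 0 then max a b else min a b)

def card_alt (start : Int) (end_ : Int) (dp : List (List Int)) (t : List Int) (n : Int) : Int :=
  if end_ < start then 0
  else
    let m := (end_ - start).toNat
    (((List.range m).foldl (bRow t start n m) (bInit t start m)).getD 0 0)

-- ===== PRECONDITION & SPEC =====
-- row s of dp must admit the Python writes dp[s][e], s < e ≤ end_
def rowOk (dp : List (List Int)) (s : Int) (end_ : Int) : Bool :=
  match PySem.List.pyGet? dp s with
  | some r => decide (-((r.length : Int)) ≤ s + 1 ∧ end_ < (r.length : Int))
  | none => false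

-- Pre_card excludes exactly the inputs where Python A raises IndexError: some t[i],
-- i in [start, end_], or some written dp[s][e] (start ≤ s < e ≤ end_) is out of range.
def Pre_card (start : Int) (end_ : Int) (dp : List (List Int)) (t : List Int) (n : Int) : Prop :=
  end_ < start ∨
  (-((t.length : Int)) ≤ start ∧ end_ < (t.length : Int) ∧
   ∀ k ∈ List.range (end_ - start).toNat, rowOk dp (start + (k : Int)) end_ = true)
instance (start : Int) (end_ : Int) (dp : List (List Int)) (t : List Int) (n : Int) : Decidable (Pre_card start end_ dp t n) := by unfold Pre_card; infer_instance

def pvWitness_card : Int × Int × List (List Int) × List Int × Int :=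
  (0, 2, [[0,0,0],[0,0,0],[0,0,0]], [3, 1, 2], 3)

def Spec_card (start : Int) (end_ : Int) (dp : List (List Int)) (t : List Int) (n : Int) (out : Int) : Prop := out = card_alt start end_ dp t n
instance (start : Int) (end_ : Int) (dp : List (List Int)) (t : List Int) (n : Int) (out : Int) : Decidable (Spec_card start end_ dp t n out) := by unfold Spec_card; infer_instance

-- ===== CLAIM (what is proved, stated in full; the proofs are below) =====
def Claim_equal_card : Prop := ∀ (start : Int) (end_ : Int) (dp : List (List Int)) (t : List Int) (n : Int), Dom_card start end_ dp t n → Pre_card start end_ dp t n → Spec_card start end_ dp t n (card start end_ dp t n)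

-- ===== LEMMAS AND PROOFS =====

theorem card_self (s : Int) (dp : List (List Int)) (t : List Int) (n : Int) :
    card s s dp t n = tGet t s := by
  rw [card]; simp

theorem card_neg (s e : Int) (dp : List (List Int)) (t : List Int) (n : Int) (h : e < s) :
    card s e dp t n = 0 := by
  rw [card]; simp [show e - s < 0 from by omega]

theorem card_step (s e : Int) (dp : List (List Int)) (t : List Int) (n : Int) (h : 1 ≤ e - s) :
    card s e dp t n =
      if PySem.Int.mod (n - (e - s)) 2 = 0 then
        max (card (s+1) e dp t n + tGet t s) (card s (e-1) dp t n + tGet t e)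
      else
        min (card (s+1) e dp t n + tGet t s) (card s (e-1) dp t n + tGet t e) := by
  rw [card]
  have h1 : ¬ (e - s < 0) := by omega
  have h2 : ¬ (e - s = 0) := by omega
  simp only [h1, h2, dite_false]

theorem getD_map_range {f : Nat → Int} {N j : Nat} (hj : j < N) :
    (((List.range N).map f).getD j 0) = f j := by
  rw [List.getD_eq_getElem?_getD, List.getElem?_map, List.getElem?_range hj]
  rfl

theorem fold_inv (start : Int) (dp : List (List Int)) (t : List Int) (n : Int) (m : Nat)
    (L : Nat) (hL : L ≤ m) :
    (List.range L).foldl (bRow t start n m) (bInit t start m) =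
      (List.range (m + 1 - L)).map
        (fun (k : Nat) => card (start + (k : Int)) (start + (k : Int) + (L : Int)) dp t n) := by
  induction L with
  | zero =>
      simp only [List.range_zero, List.foldl_nil, bInit, Nat.sub_zero]
      refine List.map_congr_left (fun k _ => ?_)
      rw [show start + (k : Int) + (((0:Nat)) : Int) = start + (k : Int) from by push_cast; ring,
        card_self]
  | succ L ih =>
      have hL' : L ≤ m := by omega
      rw [List.range_succ, List.foldl_append, List.foldl_cons, List.foldl_nil, ih hL']
      unfold bRow
      rw [show m - L = m + 1 - (L + 1) from by omega]
      refine List.map_congr_left (fun k hk => ?_)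
      have hk' : k < m + 1 - (L + 1) := List.mem_range.mp hk
      rw [getD_map_range (show k + 1 < m + 1 - L from by omega),
          getD_map_range (show k < m + 1 - L from by omega)]
      have hstep := card_step (start + (k : Int)) (start + (k : Int) + ((L : Int) + 1)) dp t n
        (by omega)
      rw [show start + (k : Int) + ((L : Int) + 1) - (start + (k : Int)) = (L : Int) + 1
            from by ring] at hstep
      have A1 : card (start + (k : Int) + 1) (start + (k : Int) + ((L : Int) + 1)) dp t n
          = card (start + ((k + 1 : Nat) : Int)) (start + ((k + 1 : Nat) : Int) + (L : Int))
              dp t n := by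
        congr 1 <;> push_cast <;> ring
      have A2 : card (start + (k : Int)) (start + (k : Int) + ((L : Int) + 1) - 1) dp t n
          = card (start + (k : Int)) (start + (k : Int) + (L : Int)) dp t n := by
        congr 1; ring
      rw [A1, A2] at hstep
      rw [show start + (k : Int) + (((L + 1 : Nat)) : Int) = start + (k : Int) + ((L : Int) + 1)
            from by push_cast; ring]
      rw [hstep]

-- ===== VERDICT (by name: the statement is the Claim_ definition above) =====
theorem card_spec : Claim_equal_card := by
  intro start end_ dp t n _ _
  unfold Spec_card card_alt
  by_cases h : end_ < start
  · rw [if_pos h]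
    exact card_neg start end_ dp t n h
  · rw [if_neg h]
    show card start end_ dp t n =
      ((List.range ((end_ - start).toNat)).foldl (bRow t start n ((end_ - start).toNat))
        (bInit t start ((end_ - start).toNat))).getD 0 0
    rw [fold_inv start dp t n ((end_ - start).toNat) ((end_ - start).toNat) le_rfl]
    rw [getD_map_range
      (show 0 < (end_ - start).toNat + 1 - (end_ - start).toNat from by omega)]
    rw [show start + (((0:Nat)) : Int) = start from by push_cast; ring,
        show start + (((end_ - start).toNat : Nat) : Int) = end_ from by omega]
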